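-- pv_equiv track=rewrite | github.com/sk123/theyownwhat | updater/update_data.py | normalize_address_for_matching
-- ===== SOURCE A (Python) =====
-- def normalize_address_for_matching(address):
--     """Normalizes an address for consistent matching."""
--     if not address:
--         return ""
--
--     # Convert to uppercase and normalize whitespace
--     normalized = ' '.join(str(address).upper().strip().split())
--
--     # Common address normalizations for better matching
--     normalizations = {
--         ' STREET': ' ST',
--         ' AVENUE': ' AVE',
--         ' ROAD': ' RD',
--         ' DRIVE': ' DR',
--         ' LANE': ' LN',
--         ' COURT': ' CT',
--         ' PLACE': ' PL',
--         ' BOULEVARD': ' BLVD',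
--         ' CIRCLE': ' CIR'
--     }
--
--     for old, new in normalizations.items():
--         normalized = normalized.replace(old, new)
--
--     return normalized
-- ===== SOURCE B (Python) =====
-- # Single left-to-right scan replacing suffix keywords, instead of nine sequential
-- # str.replace passes; same return value for every input.
-- _SUBS = [
--     (' STREET', ' ST'),
--     (' AVENUE', ' AVE'),
--     (' ROAD', ' RD'),
--     (' DRIVE', ' DR'),
--     (' LANE', ' LN'),
--     (' COURT', ' CT'),
--     (' PLACE', ' PL'),
--     (' BOULEVARD', ' BLVD'),
--     (' CIRCLE', ' CIR'),
-- ]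
--
--
-- def normalize_address_for_matching(address):
--     """Normalizes an address for consistent matching."""
--     if not address:
--         return ""
--     s = ' '.join(str(address).upper().strip().split())
--     out = []
--     i = 0
--     n = len(s)
--     while i < n:
--         for pat, rep in _SUBS:
--             if s.startswith(pat, i):
--                 out.append(rep)
--                 i += len(pat)
--                 break
--         else:
--             out.append(s[i])
--             i += 1
--     return ''.join(out)
-- ===== Notes on version B (the rewrite author's own statement) =====
-- stated objective: alternative
-- what changed: A runs nine sequential full-string str.replace passes, one per suffix keyword; B makes a single left-to-right scan over the normalized string, emitting the abbreviation and skipping the keyword whenever one of the nine space-prefixed keyword literals matches at the current position.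
import Mathlib
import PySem

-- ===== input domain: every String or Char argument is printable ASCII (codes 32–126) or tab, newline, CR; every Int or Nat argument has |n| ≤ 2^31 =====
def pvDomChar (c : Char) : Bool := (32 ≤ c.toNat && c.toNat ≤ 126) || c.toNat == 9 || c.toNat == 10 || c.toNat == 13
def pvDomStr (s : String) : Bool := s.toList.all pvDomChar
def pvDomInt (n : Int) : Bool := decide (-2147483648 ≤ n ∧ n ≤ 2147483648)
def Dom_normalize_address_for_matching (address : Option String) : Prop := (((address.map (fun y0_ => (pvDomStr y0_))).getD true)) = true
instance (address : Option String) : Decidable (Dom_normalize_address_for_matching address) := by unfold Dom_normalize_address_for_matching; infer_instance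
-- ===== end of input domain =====

set_option maxRecDepth 4000

-- B replaces A's nine sequential str.replace passes by a single left-to-right scan
-- over the normalized string (objective: alternative; same return value everywhere).

-- ===== PORT A =====
-- the dict of A, in insertion order (A iterates over its items)
def pairsA : List (String × String) :=
  [(" STREET", " ST"), (" AVENUE", " AVE"), (" ROAD", " RD"), (" DRIVE", " DR"),
   (" LANE", " LN"), (" COURT", " CT"), (" PLACE", " PL"), (" BOULEVARD", " BLVD"),
   (" CIRCLE", " CIR")]

def normalize_address_for_matching (address : Option String) : String :=
  match address with
  | none => ""            -- 'if not address' (None is falsy)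
  | some a =>
    if a = "" then ""     -- 'if not address' ('' is falsy)
    else
      -- normalized = ' '.join(str(address).upper().strip().split())
      let normalized := PySem.Str.join " " (PySem.Str.split₀ (PySem.Str.strip (PySem.Str.upper a)))
      -- for old, new in normalizations.items(): normalized = normalized.replace(old, new)
      pairsA.foldl (fun n pr => PySem.Str.replace n pr.1 pr.2) normalized

-- ===== PORT B =====
-- Source B's _SUBS table, as lists of characters
def subsB : List (List Char × List Char) :=
  [(" STREET".toList, " ST".toList),
   (" AVENUE".toList, " AVE".toList),
   (" ROAD".toList, " RD".toList),
   (" DRIVE".toList, " DR".toList),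
   (" LANE".toList, " LN".toList),
   (" COURT".toList, " CT".toList),
   (" PLACE".toList, " PL".toList),
   (" BOULEVARD".toList, " BLVD".toList),
   (" CIRCLE".toList, " CIR".toList)]

-- the inner 'for pat, rep in _SUBS: if s.startswith(pat, i)' search
def findSub (s : List Char) : Option (List Char × List Char) :=
  subsB.find? (fun pr => pr.1.isPrefixOf s)

-- Source B's while loop: one pass over the characters; on a table hit emit the
-- replacement and skip the pattern, otherwise emit the character.
-- (every pattern in subsB is nonempty, so 't.drop (pr.1.length - 1)' is exactly
--  the Python's 'i += len(pat)' applied to the remaining characters c :: t)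
def scanB : List Char → List Char
  | [] => []
  | c :: t =>
    match findSub (c :: t) with
    | some pr => pr.2 ++ scanB (t.drop (pr.1.length - 1))
    | none => c :: scanB t
  termination_by s => s.length
  decreasing_by
  all_goals simp

def normalize_address_for_matching_alt (address : Option String) : String :=
  match address with
  | none => ""
  | some a =>
    if a = "" then ""
    else
      let s := PySem.Str.join " " (PySem.Str.split₀ (PySem.Str.strip (PySem.Str.upper a)))
      String.ofList (scanB s.toList)

-- ===== PRECONDITION & SPEC =====
def Spec_normalize_address_for_matching (address : Option String) (out : String) : Prop := out = normalize_address_for_matching_alt address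
instance (address : Option String) (out : String) : Decidable (Spec_normalize_address_for_matching address out) := by unfold Spec_normalize_address_for_matching; infer_instance

-- ===== CLAIM (what is proved, stated in full; the proofs are below) =====
def Claim_equal_normalize_address_for_matching : Prop := ∀ (address : Option String), Dom_normalize_address_for_matching address → Spec_normalize_address_for_matching address (normalize_address_for_matching address)

-- ===== LEMMAS AND PROOFS =====

-- A simple fuel-free recursion equal to PySem.Chars.replace (for nonempty pattern):
def rep1 (old new : List Char) : List Char → List Char
  | [] => []
  | c :: t =>
    if old <+: (c :: t) then new ++ rep1 old new (t.drop (old.length - 1))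
    else c :: rep1 old new t
  termination_by s => s.length
  decreasing_by
  all_goals simp

theorem rep1_nil (old new : List Char) : rep1 old new [] = [] := by rw [rep1]

theorem rep1_cons (old new : List Char) (c : Char) (t : List Char) :
    rep1 old new (c :: t) =
      if old <+: (c :: t) then new ++ rep1 old new (t.drop (old.length - 1))
      else c :: rep1 old new t := by rw [rep1]

theorem go_eq (old new : List Char) (hold : old ≠ []) :
    ∀ (fuel : Nat) (l acc : List Char), l.length ≤ fuel →
      PySem.Chars.replace.go old new fuel l acc = acc.reverse ++ rep1 old new l := by
  intro fuel
  induction fuel with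
  | zero =>
    intro l acc h
    have hl : l = [] := by cases l <;> simp_all
    subst hl
    rw [PySem.Chars.replace.go, rep1_nil]
  | succ n ih =>
    intro l acc h
    match l with
    | [] => rw [PySem.Chars.replace.go, rep1_nil] <;> simp
    | c :: t =>
      rw [PySem.Chars.replace.go, rep1_cons]
      have hone : 1 ≤ old.length := by cases old <;> simp_all
      have hlt : t.length ≤ n := by simp only [List.length_cons] at h; omega
      by_cases hp : old <+: (c :: t)
      · simp only [List.isPrefixOf_iff_prefix, hp, if_true]
        have hd : List.drop old.length (c :: t) = t.drop (old.length - 1) := by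
          obtain ⟨k, hk⟩ : ∃ k, old.length = k + 1 := ⟨old.length - 1, by omega⟩
          simp [hk]
        have hlen : (List.drop old.length (c :: t)).length ≤ n := by
          simp only [List.length_drop, List.length_cons]; omega
        rw [ih _ _ hlen, hd]
        simp
      · simp only [List.isPrefixOf_iff_prefix, hp, if_false]
        rw [ih t (c :: acc) hlt]
        simp

theorem replace_eq_rep1 (s old new : List Char) (hold : old ≠ []) :
    PySem.Chars.replace s old new = rep1 old new s := by
  rw [PySem.Chars.replace]
  simp only [List.isEmpty_iff, hold, if_false]
  rw [go_eq old new hold s.length s [] le_rfl]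
  simp

-- if p and a are incomparable under the prefix order, p is not a prefix of a ++ x
theorem not_prefix_append (p a x : List Char) (h1 : ¬ p <+: a) (h2 : ¬ a <+: p) :
    ¬ p <+: a ++ x := by
  intro h
  by_cases hl : p.length ≤ a.length
  · exact h1 (List.prefix_of_prefix_length_le h (List.prefix_append a x) hl)
  · exact h2 (List.prefix_of_prefix_length_le (List.prefix_append a x) h (by omega))

-- a space-free block passes through rep1 untouched (patterns start with a space)
theorem pass_spaceless (p r : List Char) (hp : p.head? = some ' ') :
    ∀ (a x : List Char), (∀ ch ∈ a, ch ≠ ' ') → rep1 p r (a ++ x) = a ++ rep1 p r x := by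
  intro a
  induction a with
  | nil => intro x _; simp
  | cons d a' ih =>
    intro x hsp
    have hd : d ≠ ' ' := hsp d (List.mem_cons_self ..)
    have hnp : ¬ p <+: d :: (a' ++ x) := by
      intro hcon
      cases p with
      | nil => simp at hp
      | cons q p' =>
        have hq : q = ' ' := by simpa using hp
        exact hd (by rw [← hq]; exact (List.cons_prefix_cons.mp hcon).1.symm)
    rw [List.cons_append, rep1_cons, if_neg hnp, ih x (fun ch hch => hsp ch (List.mem_cons_of_mem _ hch))]
    simp

-- a block ' ' :: spaceless that is prefix-incomparable with p passes through rep1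
theorem pass (p r a x : List Char) (hp : p.head? = some ' ')
    (ha : a.head? = some ' ') (ha2 : ∀ ch ∈ a.tail, ch ≠ ' ')
    (h1 : ¬ p <+: a) (h2 : ¬ a <+: p) :
    rep1 p r (a ++ x) = a ++ rep1 p r x := by
  cases a with
  | nil => simp at ha
  | cons b a' =>
    have hb : b = ' ' := by simpa using ha
    have hnp : ¬ p <+: (b :: a') ++ x := not_prefix_append p (b :: a') x h1 h2
    rw [List.cons_append, rep1_cons, if_neg (by simpa using hnp)]
    rw [pass_spaceless p r hp a' x (by simpa using ha2)]
    simp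

-- rep1 on its own pattern at the front
theorem match_head (p r x : List Char) (hpne : p ≠ []) :
    rep1 p r (p ++ x) = r ++ rep1 p r x := by
  cases p with
  | nil => exact absurd rfl hpne
  | cons c p' =>
    have hpfx : (c :: p') <+: (c :: p') ++ x := List.prefix_append _ _
    rw [List.cons_append, rep1_cons, if_pos (by simpa using hpfx)]
    have hlen : (c :: p').length - 1 = p'.length := by simp
    rw [hlen, List.drop_left]

-- a word with no spaces never becomes a prefix through rep1 (replacements start with ' ')
theorem not_prefix_rep1 (p r : List Char) (hr : r.head? = some ' ') :
    ∀ (n : Nat) (x w : List Char), x.length ≤ n → w ≠ [] → (∀ ch ∈ w, ch ≠ ' ') →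
      ¬ w <+: x → ¬ w <+: rep1 p r x := by
  intro n
  induction n with
  | zero =>
    intro x w hx hw _ _
    have : x = [] := by cases x <;> simp_all
    subst this
    rw [rep1_nil]
    intro hcon
    exact hw (List.prefix_nil.mp hcon)
  | succ n ih =>
    intro x w hx hw hsp hnp
    cases x with
    | nil =>
      rw [rep1_nil]
      intro hcon
      exact hw (List.prefix_nil.mp hcon)
    | cons c t =>
      have hlt : t.length ≤ n := by simp only [List.length_cons] at hx; omega
      rw [rep1_cons]
      by_cases hm : p <+: (c :: t)
      · simp only [hm, if_true]
        intro hcon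
        cases w with
        | nil => exact hw rfl
        | cons w0 w1 =>
          cases r with
          | nil => simp at hr
          | cons r0 r' =>
            have hr0 : r0 = ' ' := by simpa using hr
            have : w0 = r0 := (List.cons_prefix_cons.mp (by simpa using hcon)).1
            exact hsp w0 (List.mem_cons_self ..) (this.trans hr0)
      · simp only [hm, if_false]
        intro hcon
        cases w with
        | nil => exact hw rfl
        | cons w0 w1 =>
          obtain ⟨hw0, hw1⟩ := List.cons_prefix_cons.mp hcon
          by_cases hw1e : w1 = []
          · subst hw1e; subst hw0
            exact hnp (List.cons_prefix_cons.mpr ⟨rfl, List.nil_prefix⟩)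
          · have hnp1 : ¬ w1 <+: t := by
              intro hcon1
              exact hnp (by rw [hw0]; exact List.cons_prefix_cons.mpr ⟨rfl, hcon1⟩)
            exact ih t w1 hlt hw1e (fun ch hch => hsp ch (List.mem_cons_of_mem _ hch)) hnp1 hw1

-- the step function of A's replace loop, at the character-list level
def chainStep (acc : List Char) (pr : List Char × List Char) : List Char := rep1 pr.1 pr.2 acc

def chainR (s : List Char) : List Char := subsB.foldl chainStep s

theorem scanB_nil : scanB [] = [] := by rw [scanB]

theorem scanB_cons (c : Char) (t : List Char) :
    scanB (c :: t) =
      match findSub (c :: t) with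
      | some pr => pr.2 ++ scanB (t.drop (pr.1.length - 1))
      | none => c :: scanB t := by rw [scanB]

-- shape hypothesis on a pattern/replacement table: every pattern is a space
-- followed by a nonempty space-free word, every replacement starts with a space
def GoodTable (L : List (List Char × List Char)) : Prop :=
  ∀ pr ∈ L, pr.1.head? = some ' ' ∧ pr.1.tail ≠ [] ∧ (∀ ch ∈ pr.1.tail, ch ≠ ' ') ∧
            pr.2.head? = some ' '

-- a block prefix-incomparable with every pattern of L passes through the whole loop
theorem foldl_pass (L : List (List Char × List Char)) (a : List Char)
    (hL : ∀ pr ∈ L, pr.1.head? = some ' ' ∧ ¬ pr.1 <+: a ∧ ¬ a <+: pr.1)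
    (ha : a.head? = some ' ') (ha2 : ∀ ch ∈ a.tail, ch ≠ ' ') :
    ∀ x, L.foldl chainStep (a ++ x) = a ++ L.foldl chainStep x := by
  induction L with
  | nil => intro x; simp
  | cons pr L' ih =>
    intro x
    obtain ⟨hp, h1, h2⟩ := hL pr (List.mem_cons_self ..)
    simp only [List.foldl_cons, chainStep]
    rw [pass pr.1 pr.2 a x hp ha ha2 h1 h2]
    exact ih (fun q hq => hL q (List.mem_cons_of_mem _ hq)) (rep1 pr.1 pr.2 x)

-- when no pattern matches at the head, the head character passes through the loop
theorem foldl_cons_pass (L : List (List Char × List Char)) (c : Char) :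
    GoodTable L →
    ∀ rest, (∀ pr ∈ L, ¬ pr.1 <+: c :: rest) →
      L.foldl chainStep (c :: rest) = c :: L.foldl chainStep rest := by
  induction L with
  | nil => intro _ rest _; simp
  | cons pr L' ih =>
    intro hG rest h
    obtain ⟨hph, hpt, hps, hrh⟩ := hG pr (List.mem_cons_self ..)
    have h0 : ¬ pr.1 <+: c :: rest := h pr (List.mem_cons_self ..)
    simp only [List.foldl_cons, chainStep]
    rw [rep1_cons, if_neg h0]
    refine ih (fun q hq => hG q (List.mem_cons_of_mem _ hq)) (rep1 pr.1 pr.2 rest) ?_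
    intro q hq hcon
    have hnq : ¬ q.1 <+: c :: rest := h q (List.mem_cons_of_mem _ hq)
    obtain ⟨hqh, hqt, hqs, _⟩ := hG q (List.mem_cons_of_mem _ hq)
    cases hq1 : q.1 with
    | nil => rw [hq1] at hqh; simp at hqh
    | cons q0 w =>
      have hq0 : q0 = ' ' := by rw [hq1] at hqh; simpa using hqh
      rw [hq1] at hcon hnq
      obtain ⟨hc0, hw⟩ := List.cons_prefix_cons.mp hcon
      by_cases hc : c = ' '
      · subst hc
        have hwrest : ¬ w <+: rest := by
          intro hcon1
          exact hnq (List.cons_prefix_cons.mpr ⟨hq0, hcon1⟩)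
        have hwne : w ≠ [] := by rw [hq1] at hqt; simpa using hqt
        have hwsp : ∀ ch ∈ w, ch ≠ ' ' := by rw [hq1] at hqs; simpa using hqs
        exact not_prefix_rep1 pr.1 pr.2 hrh rest.length rest w le_rfl hwne hwsp hwrest hw
      · exact hc (hc0 ▸ hq0.symm ▸ rfl)

-- splitting the loop at the (unique) pattern matching at the head of the string
theorem chain_split (pre post : List (List Char × List Char)) (p r t : List Char)
    (hp : p.head? = some ' ') (hp2 : ∀ ch ∈ p.tail, ch ≠ ' ') (hpne : p ≠ [])
    (hr : r.head? = some ' ') (hr2 : ∀ ch ∈ r.tail, ch ≠ ' ')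
    (hpre : ∀ pr ∈ pre, pr.1.head? = some ' ' ∧ ¬ pr.1 <+: p ∧ ¬ p <+: pr.1)
    (hpost : ∀ pr ∈ post, pr.1.head? = some ' ' ∧ ¬ pr.1 <+: r ∧ ¬ r <+: pr.1) :
    (pre ++ (p, r) :: post).foldl chainStep (p ++ t) =
      r ++ (pre ++ (p, r) :: post).foldl chainStep t := by
  rw [List.foldl_append, List.foldl_cons, List.foldl_append, List.foldl_cons]
  rw [foldl_pass pre p hpre hp hp2 t]
  simp only [chainStep]
  rw [match_head p r _ hpne]
  rw [foldl_pass post r hpost hr hr2 _]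

-- the uniform 'a pattern matches at the head' case of the main induction
theorem main_case (pre post : List (List Char × List Char)) (pt r : List Char)
    (c : Char) (t t' : List Char)
    (hsub : subsB = pre ++ ((' ' :: pt), r) :: post)
    (_hptne : pt ≠ []) (hpts : ∀ ch ∈ pt, ch ≠ ' ')
    (hr : r.head? = some ' ') (hr2 : ∀ ch ∈ r.tail, ch ≠ ' ')
    (hpre : ∀ pr ∈ pre, pr.1.head? = some ' ' ∧ ¬ pr.1 <+: (' ' :: pt) ∧ ¬ (' ' :: pt) <+: pr.1)
    (hpost : ∀ pr ∈ post, pr.1.head? = some ' ' ∧ ¬ pr.1 <+: r ∧ ¬ r <+: pr.1)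
    (heq : (' ' :: pt) ++ t' = c :: t)
    (hih : chainR t' = scanB t') :
    chainR (c :: t) = r ++ scanB (t.drop ((' ' :: pt).length - 1)) := by
  have hc : c = ' ' := by
    have := heq
    rw [List.cons_append] at this
    exact ((List.cons.injEq ..).mp this).1.symm
  have ht : t = pt ++ t' := by
    have := heq
    rw [List.cons_append] at this
    exact ((List.cons.injEq ..).mp this).2.symm
  subst hc; subst ht
  have hdrop : (pt ++ t').drop ((' ' :: pt).length - 1) = t' := by
    have : (' ' :: pt).length - 1 = pt.length := by simp
    rw [this, List.drop_left]
  rw [hdrop, ← hih]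
  show chainR ((' ' :: pt) ++ t') = r ++ chainR t'
  unfold chainR
  rw [hsub]
  exact chain_split pre post (' ' :: pt) r t' (by simp) (by simpa using hpts) (by simp)
    hr hr2 hpre hpost

theorem chainR_nil : chainR [] = [] := by
  simp only [chainR, subsB, List.foldl_cons, List.foldl_nil, chainStep, rep1_nil]

theorem goodTable_subsB : GoodTable subsB := by unfold GoodTable; simp [subsB]

theorem chain_eq_scan : ∀ (n : Nat) (s : List Char), s.length ≤ n → chainR s = scanB s := by
  intro n
  induction n with
  | zero =>
    intro s hs
    have : s = [] := by cases s <;> simp_all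
    subst this
    rw [scanB_nil, chainR_nil]
  | succ n ih =>
    intro s hs
    cases s with
    | nil => rw [scanB_nil, chainR_nil]
    | cons c t =>
      have hlt : t.length ≤ n := by simp only [List.length_cons] at hs; omega
      rw [scanB_cons]
      cases h : findSub (c :: t) with
      | none =>
        have hall : ∀ pr ∈ subsB, ¬ pr.1 <+: c :: t := by
          intro pr hpr
          have := List.find?_eq_none.mp h pr hpr
          simpa [List.isPrefixOf_iff_prefix] using this
        show chainR (c :: t) = c :: scanB t
        rw [← ih t hlt]
        exact foldl_cons_pass subsB c goodTable_subsB t hall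
      | some pr =>
        have hmem : pr ∈ subsB := List.mem_of_find?_eq_some h
        have hpfx : pr.1 <+: c :: t := by
          have := List.find?_some h
          simpa [List.isPrefixOf_iff_prefix] using this
        show chainR (c :: t) = pr.2 ++ scanB (t.drop (pr.1.length - 1))
        obtain ⟨t', ht'⟩ := hpfx
        have hlen' : t'.length ≤ n := by
          have := congrArg List.length ht'
          simp only [List.length_append, List.length_cons] at this
          have h1 : 1 ≤ pr.1.length := by
            fin_cases hmem <;> simp
          omega
        have hihs := ih t' hlen'
        fin_cases hmem
        · exact main_case
            ([] : List (List Char × List Char))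
            [(" AVENUE".toList, " AVE".toList),
              (" ROAD".toList, " RD".toList),
              (" DRIVE".toList, " DR".toList),
              (" LANE".toList, " LN".toList),
              (" COURT".toList, " CT".toList),
              (" PLACE".toList, " PL".toList),
              (" BOULEVARD".toList, " BLVD".toList),
              (" CIRCLE".toList, " CIR".toList)]
            "STREET".toList " ST".toList c t t' rfl (by simp) (by simp)
            rfl (by simp) (by simp [List.cons_prefix_cons]) (by simp [List.cons_prefix_cons]) ht' hihs
        · exact main_case
            [(" STREET".toList, " ST".toList)]
            [(" ROAD".toList, " RD".toList),
              (" DRIVE".toList, " DR".toList),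
              (" LANE".toList, " LN".toList),
              (" COURT".toList, " CT".toList),
              (" PLACE".toList, " PL".toList),
              (" BOULEVARD".toList, " BLVD".toList),
              (" CIRCLE".toList, " CIR".toList)]
            "AVENUE".toList " AVE".toList c t t' rfl (by simp) (by simp)
            rfl (by simp) (by simp [List.cons_prefix_cons]) (by simp [List.cons_prefix_cons]) ht' hihs
        · exact main_case
            [(" STREET".toList, " ST".toList),
              (" AVENUE".toList, " AVE".toList)]
            [(" DRIVE".toList, " DR".toList),
              (" LANE".toList, " LN".toList),
              (" COURT".toList, " CT".toList),
              (" PLACE".toList, " PL".toList),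
              (" BOULEVARD".toList, " BLVD".toList),
              (" CIRCLE".toList, " CIR".toList)]
            "ROAD".toList " RD".toList c t t' rfl (by simp) (by simp)
            rfl (by simp) (by simp [List.cons_prefix_cons]) (by simp [List.cons_prefix_cons]) ht' hihs
        · exact main_case
            [(" STREET".toList, " ST".toList),
              (" AVENUE".toList, " AVE".toList),
              (" ROAD".toList, " RD".toList)]
            [(" LANE".toList, " LN".toList),
              (" COURT".toList, " CT".toList),
              (" PLACE".toList, " PL".toList),
              (" BOULEVARD".toList, " BLVD".toList),
              (" CIRCLE".toList, " CIR".toList)]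
            "DRIVE".toList " DR".toList c t t' rfl (by simp) (by simp)
            rfl (by simp) (by simp [List.cons_prefix_cons]) (by simp [List.cons_prefix_cons]) ht' hihs
        · exact main_case
            [(" STREET".toList, " ST".toList),
              (" AVENUE".toList, " AVE".toList),
              (" ROAD".toList, " RD".toList),
              (" DRIVE".toList, " DR".toList)]
            [(" COURT".toList, " CT".toList),
              (" PLACE".toList, " PL".toList),
              (" BOULEVARD".toList, " BLVD".toList),
              (" CIRCLE".toList, " CIR".toList)]
            "LANE".toList " LN".toList c t t' rfl (by simp) (by simp)
            rfl (by simp) (by simp [List.cons_prefix_cons]) (by simp [List.cons_prefix_cons]) ht' hihs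
        · exact main_case
            [(" STREET".toList, " ST".toList),
              (" AVENUE".toList, " AVE".toList),
              (" ROAD".toList, " RD".toList),
              (" DRIVE".toList, " DR".toList),
              (" LANE".toList, " LN".toList)]
            [(" PLACE".toList, " PL".toList),
              (" BOULEVARD".toList, " BLVD".toList),
              (" CIRCLE".toList, " CIR".toList)]
            "COURT".toList " CT".toList c t t' rfl (by simp) (by simp)
            rfl (by simp) (by simp [List.cons_prefix_cons]) (by simp [List.cons_prefix_cons]) ht' hihs
        · exact main_case
            [(" STREET".toList, " ST".toList),
              (" AVENUE".toList, " AVE".toList),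
              (" ROAD".toList, " RD".toList),
              (" DRIVE".toList, " DR".toList),
              (" LANE".toList, " LN".toList),
              (" COURT".toList, " CT".toList)]
            [(" BOULEVARD".toList, " BLVD".toList),
              (" CIRCLE".toList, " CIR".toList)]
            "PLACE".toList " PL".toList c t t' rfl (by simp) (by simp)
            rfl (by simp) (by simp [List.cons_prefix_cons]) (by simp [List.cons_prefix_cons]) ht' hihs
        · exact main_case
            [(" STREET".toList, " ST".toList),
              (" AVENUE".toList, " AVE".toList),
              (" ROAD".toList, " RD".toList),
              (" DRIVE".toList, " DR".toList),
              (" LANE".toList, " LN".toList),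
              (" COURT".toList, " CT".toList),
              (" PLACE".toList, " PL".toList)]
            [(" CIRCLE".toList, " CIR".toList)]
            "BOULEVARD".toList " BLVD".toList c t t' rfl (by simp) (by simp)
            rfl (by simp) (by simp [List.cons_prefix_cons]) (by simp [List.cons_prefix_cons]) ht' hihs
        · exact main_case
            [(" STREET".toList, " ST".toList),
              (" AVENUE".toList, " AVE".toList),
              (" ROAD".toList, " RD".toList),
              (" DRIVE".toList, " DR".toList),
              (" LANE".toList, " LN".toList),
              (" COURT".toList, " CT".toList),
              (" PLACE".toList, " PL".toList),
              (" BOULEVARD".toList, " BLVD".toList)]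
            ([] : List (List Char × List Char))
            "CIRCLE".toList " CIR".toList c t t' rfl (by simp) (by simp)
            rfl (by simp) (by simp [List.cons_prefix_cons]) (by simp [List.cons_prefix_cons]) ht' hihs

-- A's String-level replace loop equals chainR at the character level
theorem foldA_toList (s : String) :
    (pairsA.foldl (fun n pr => PySem.Str.replace n pr.1 pr.2) s).toList = chainR s.toList := by
  simp only [pairsA, chainR, subsB, List.foldl_cons, List.foldl_nil, chainStep,
    PySem.Str.toList_replace]
  rw [replace_eq_rep1 _ _ _ (by decide), replace_eq_rep1 _ _ _ (by decide),
    replace_eq_rep1 _ _ _ (by decide), replace_eq_rep1 _ _ _ (by decide),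
    replace_eq_rep1 _ _ _ (by decide), replace_eq_rep1 _ _ _ (by decide),
    replace_eq_rep1 _ _ _ (by decide), replace_eq_rep1 _ _ _ (by decide),
    replace_eq_rep1 _ _ _ (by decide)]

-- ===== VERDICT (by name: the statement is the Claim_ definition above) =====
theorem normalize_address_for_matching_spec : Claim_equal_normalize_address_for_matching := by
  intro address _
  unfold Spec_normalize_address_for_matching
  unfold normalize_address_for_matching normalize_address_for_matching_alt
  cases address with
  | none => rfl
  | some a =>
    by_cases ha : a = ""
    · simp [ha]
    · simp only [ha, if_false]
      set s := PySem.Str.join " " (PySem.Str.split₀ (PySem.Str.strip (PySem.Str.upper a))) with hsdef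
      calc pairsA.foldl (fun n pr => PySem.Str.replace n pr.1 pr.2) s
          = String.ofList ((pairsA.foldl (fun n pr => PySem.Str.replace n pr.1 pr.2) s).toList) := by
            rw [String.ofList_toList]
        _ = String.ofList (scanB s.toList) := by
            rw [foldA_toList, chain_eq_scan s.toList.length s.toList le_rfl]
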